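-- pv_equiv track=rewrite | github.com/AgY-12/24fall_CS101 | Cheatsheet/Cantor_expansion.py | retro_Cantor
-- ===== SOURCE A (Python) =====
-- import math
--
-- def retro_Cantor(x,length):#length是排列的长度,不然我就不知道是123的排列还是1234的排列了
--     res=[]
--     r=list(range(1,length+1))
--     for i in range(length-1,-1,-1):
--         f=math.factorial(i)
--         res.append(r.pop(x//f))
--         x%=f
--     return res
-- ===== SOURCE B (Python) =====
-- import math
--
-- def retro_Cantor(x, length):
--     # builds the permutation back-to-front: for each suffix length m, the new head is
--     # digit k of x in factorial base, and previously placed values >= k+1 shift up by one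
--     res = []
--     for m in range(1, length + 1):
--         f = math.factorial(m - 1)
--         k = (x % (f * m)) // f
--         res = [k + 1] + [e + 1 if e > k else e for e in res]
--     return res
-- ===== Notes on version B (the rewrite author's own statement) =====
-- stated objective: alternative
-- what changed: B builds the permutation back-to-front from the factorial-base digits of x, shifting already-placed values upward, instead of A's popping the (x//i!)-th element from a shrinking candidate list.
import Mathlib
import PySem

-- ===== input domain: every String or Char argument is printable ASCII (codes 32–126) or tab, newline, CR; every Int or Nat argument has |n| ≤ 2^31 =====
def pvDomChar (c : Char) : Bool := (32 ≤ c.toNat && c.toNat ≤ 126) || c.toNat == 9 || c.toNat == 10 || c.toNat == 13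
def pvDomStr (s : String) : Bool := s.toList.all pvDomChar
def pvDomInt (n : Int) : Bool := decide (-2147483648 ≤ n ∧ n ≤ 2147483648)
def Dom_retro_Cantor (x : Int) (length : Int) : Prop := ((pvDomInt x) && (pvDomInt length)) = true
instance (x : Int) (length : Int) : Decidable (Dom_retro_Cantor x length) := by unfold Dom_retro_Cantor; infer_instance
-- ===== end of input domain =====

-- B rebuilds the permutation back-to-front from the factorial-base digits of x (one suffix
-- at a time, shifting already-placed values), instead of popping from a shrinking list: an
-- alternative decomposition of the same O(n^2) task.

-- ===== PORT A =====
-- math.factorial; exact for i ≥ 0 (A's loop only ever passes i ≥ 0)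
def pyFactorial (i : Int) : Int := (Nat.factorial i.toNat : Int)

-- the body of A's for-loop; state = (res, r, x); the `none` branch is Python's IndexError
-- (excluded by Pre_retro_Cantor), where the port just keeps the state
def stepA (st : List Int × List Int × Int) (i : Int) : List Int × List Int × Int :=
  let f := pyFactorial i
  match PySem.List.pop? st.2.1 (PySem.Int.floordiv st.2.2 f) with
  | some vr => (st.1 ++ [vr.1], vr.2, PySem.Int.mod st.2.2 f)
  | none => st

def retro_Cantor (x : Int) (length : Int) : List Int :=
  ((PySem.List.pyRange (length - 1) (-1) (-1)).foldl stepA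
    ([], PySem.List.pyRange 1 (length + 1) 1, x)).1

-- ===== PORT B =====
-- the body of B's for-loop over m = 1..length; res is the suffix permutation built so far
def stepB (x : Int) (res : List Int) (m : Int) : List Int :=
  let f := pyFactorial (m - 1)
  let k := PySem.Int.floordiv (PySem.Int.mod x (f * m)) f
  (k + 1) :: res.map (fun e => if k < e then e + 1 else e)

def retro_Cantor_alt (x : Int) (length : Int) : List Int :=
  (PySem.List.pyRange 1 (length + 1) 1).foldl (stepB x) []

-- ===== PRECONDITION & SPEC =====
-- Exactly the inputs where A returns: for length > 0 the rank x must satisfy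
-- -length! ≤ x < length!, otherwise A's first r.pop(x//f) raises IndexError.
def Pre_retro_Cantor (x : Int) (length : Int) : Prop :=
  length ≤ 0 ∨ (-(Nat.factorial length.toNat : Int) ≤ x ∧ x < (Nat.factorial length.toNat : Int))
instance (x : Int) (length : Int) : Decidable (Pre_retro_Cantor x length) := by
  unfold Pre_retro_Cantor; infer_instance

def pvWitness_retro_Cantor : Int × Int := (3, 3)

def Spec_retro_Cantor (x : Int) (length : Int) (out : List Int) : Prop := out = retro_Cantor_alt x length
instance (x : Int) (length : Int) (out : List Int) : Decidable (Spec_retro_Cantor x length out) := by unfold Spec_retro_Cantor; infer_instance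

-- ===== CLAIM (what is proved, stated in full; the proofs are below) =====
def Claim_equal_retro_Cantor : Prop := ∀ (x : Int) (length : Int), Dom_retro_Cantor x length → Pre_retro_Cantor x length → Spec_retro_Cantor x length (retro_Cantor x length)

-- ===== LEMMAS AND PROOFS =====

-- common recursive description of the result (proof-side only): head digit, then the
-- shifted inverse of the remainder
def Rspec : Nat → Int → List Int
  | 0, _ => []
  | n + 1, x =>
    let f : Int := (Nat.factorial n : Int)
    let k := PySem.Int.floordiv x f
    (k + 1) :: (Rspec n (PySem.Int.mod x f)).map (fun e => if k < e then e + 1 else e)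

lemma fact_pos (n : Nat) : (0 : Int) < (Nat.factorial n : Int) := by
  exact_mod_cast Nat.factorial_pos n

-- A's fold threads res by appending: pull the accumulator out front
lemma foldA_acc (is : List Int) : ∀ (res r : List Int) (x : Int),
    is.foldl stepA (res, r, x)
      = (res ++ (is.foldl stepA ([], r, x)).1, (is.foldl stepA ([], r, x)).2) := by
  induction is with
  | nil => intro res r x; simp [List.foldl]
  | cons i is ih =>
    intro res r x
    simp only [List.foldl]
    rcases hp : PySem.List.pop? r (PySem.Int.floordiv x (pyFactorial i)) with _ | vr
    · simpa [stepA, hp] using ih res r x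
    · simp only [stepA, hp]
      rw [ih (res ++ [vr.1]), ih ([] ++ [vr.1])]
      simp

lemma foldA_acc1 (is : List Int) (res r : List Int) (x : Int) :
    (is.foldl stepA (res, r, x)).1 = res ++ (is.foldl stepA ([], r, x)).1 := by
  rw [foldA_acc]

-- popping an in-range (possibly negative, Python-wrapped) index
lemma pop?_eff {α : Type} (xs : List α) (i : Int) (j : Nat) (hj : j < xs.length)
    (h : i = (j : Int) ∨ i = (j : Int) - xs.length) :
    PySem.List.pop? xs i = some (xs[j], xs.eraseIdx j) := by
  rcases h with h | h
  · subst h; exact PySem.List.pop?_natCast xs j hj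
  · subst h
    simp only [PySem.List.pop?, PySem.List.pyIdx?]
    have h1 : ¬ (0 ≤ (j : Int) - xs.length) := by omega
    have h2 : -(xs.length : Int) ≤ (j : Int) - xs.length := by omega
    rw [if_neg h1, if_pos h2]
    have h3 : (-((j : Int) - xs.length)).toNat = xs.length - j := by omega
    have h4 : xs.length - (xs.length - j) = j := by omega
    rw [h3, h4]
    simp [List.getElem?_eq_getElem hj]

-- erasing index j from [1..n+1] = shifting [1..n] above j
lemma erase_pyRange (n j : Nat) (hj : j < n + 1) :
    (PySem.List.pyRange 1 ((n : Int) + 1 + 1) 1).eraseIdx j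
      = (PySem.List.pyRange 1 ((n : Int) + 1) 1).map (fun e => if (j : Int) < e then e + 1 else e) := by
  apply List.ext_getElem
  · simp [List.length_eraseIdx, PySem.List.length_pyRange_one]
    omega
  · intro i h1 h2
    by_cases hc : i < j
    · rw [List.getElem_eraseIdx, dif_pos hc]
      simp only [List.getElem_map, PySem.List.getElem_pyRange_one]
      rw [if_neg (by omega)]
    · rw [List.getElem_eraseIdx, dif_neg hc]
      simp only [List.getElem_map, PySem.List.getElem_pyRange_one]
      rw [if_pos (by omega)]
      push_cast
      ring

lemma coreA : ∀ (n : Nat) (g : Int → Int) (x : Int),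
    -((Nat.factorial n : Int)) ≤ x → x < (Nat.factorial n : Int) →
    ((PySem.List.pyRange ((n : Int) - 1) (-1) (-1)).foldl stepA
        ([], (PySem.List.pyRange 1 ((n : Int) + 1) 1).map g, x)).1
      = (Rspec n (PySem.Int.mod x (Nat.factorial n : Int))).map g := by
  intro n
  induction n with
  | zero =>
    intro g x h1 h2
    rw [show ((0 : Nat) : Int) - 1 = -1 by norm_num]
    rw [PySem.List.pyRange_neg_one_eq_nil (by norm_num)]
    simp [Rspec]
  | succ n ih =>
    intro g x h1 h2
    have hcast : ((n + 1 : Nat) : Int) = (n : Int) + 1 := by push_cast; ring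
    rw [hcast]
    have hFpos := fact_pos n
    have hMpos := fact_pos (n + 1)
    have hM : (Nat.factorial n : Int) * ((n : Int) + 1) = (Nat.factorial (n + 1) : Int) := by
      rw [Nat.factorial_succ]; push_cast; ring
    -- the (nonnegative) Python value of x mod (n+1)! and the wrapped pop index
    have hxt0 : 0 ≤ PySem.Int.mod x (Nat.factorial (n + 1) : Int) := PySem.Int.mod_nonneg x hMpos
    have hxtlt : PySem.Int.mod x (Nat.factorial (n + 1) : Int) < (Nat.factorial (n + 1) : Int) :=
      PySem.Int.mod_lt x hMpos
    have hxtval : PySem.Int.mod x (Nat.factorial (n + 1) : Int) = x ∨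
        PySem.Int.mod x (Nat.factorial (n + 1) : Int) = x + (Nat.factorial (n + 1) : Int) := by
      rw [PySem.Int.mod_eq_emod_of_pos hMpos]
      by_cases hx : 0 ≤ x
      · left; exact Int.emod_eq_of_lt hx h2
      · right
        rw [← Int.add_emod_right]
        exact Int.emod_eq_of_lt (by omega) (by omega)
    have hkR0 : 0 ≤ PySem.Int.floordiv (PySem.Int.mod x (Nat.factorial (n + 1) : Int)) (Nat.factorial n : Int) :=
      (PySem.Int.le_floordiv_iff_mul_le hFpos).mpr (by simpa using hxt0)
    have hkRlt : PySem.Int.floordiv (PySem.Int.mod x (Nat.factorial (n + 1) : Int)) (Nat.factorial n : Int) < (n : Int) + 1 :=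
      (PySem.Int.floordiv_lt_iff_lt_mul hFpos).mpr (by rw [mul_comm, hM]; exact hxtlt)
    obtain ⟨j, hj⟩ : ∃ j : Nat, (j : Int) = PySem.Int.floordiv (PySem.Int.mod x (Nat.factorial (n + 1) : Int)) (Nat.factorial n : Int) :=
      ⟨_, Int.toNat_of_nonneg hkR0⟩
    -- the raw (possibly negative) index A pops
    have hk : PySem.Int.floordiv x (Nat.factorial n : Int) = (j : Int) ∨
        PySem.Int.floordiv x (Nat.factorial n : Int) = (j : Int) - ((n : Int) + 1) := by
      rcases hxtval with hv | hv
      · left; rw [hj, hv]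
      · right
        rw [hj, hv, PySem.Int.floordiv_eq_ediv_of_pos hFpos, PySem.Int.floordiv_eq_ediv_of_pos hFpos]
        rw [← hM, mul_comm]
        rw [Int.add_mul_ediv_right x ((n : Int) + 1) (ne_of_gt hFpos)]
        ring
    -- evaluate the first iteration of A's loop
    have hlen : ((PySem.List.pyRange 1 ((n : Int) + 1 + 1) 1).map g).length = n + 1 := by
      simp only [List.length_map, PySem.List.length_pyRange_one]
      omega
    have hjlt : j < ((PySem.List.pyRange 1 ((n : Int) + 1 + 1) 1).map g).length := by omega
    have hpop := pop?_eff ((PySem.List.pyRange 1 ((n : Int) + 1 + 1) 1).map g)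
      (PySem.Int.floordiv x (Nat.factorial n : Int)) j hjlt
      (by rw [hlen]; push_cast; exact hk)
    rw [show (n : Int) + 1 - 1 = (n : Int) by ring]
    rw [PySem.List.pyRange_neg_one_cons (by omega : (-1 : Int) < (n : Int))]
    rw [List.foldl_cons]
    have hf : pyFactorial ((n : Int)) = (Nat.factorial n : Int) := by simp [pyFactorial]
    simp only [stepA, hf, hpop]
    -- the popped element and the remaining list
    have hget : ((PySem.List.pyRange 1 ((n : Int) + 1 + 1) 1).map g)[j] = g (1 + (j : Int)) := by
      rw [List.getElem_map, PySem.List.getElem_pyRange_one]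
    have herase : ((PySem.List.pyRange 1 ((n : Int) + 1 + 1) 1).map g).eraseIdx j
        = (PySem.List.pyRange 1 ((n : Int) + 1) 1).map
            (fun e => g (if (j : Int) < e then e + 1 else e)) := by
      rw [List.eraseIdx_map, erase_pyRange n j (by omega), List.map_map]
      rfl
    rw [foldA_acc1, hget, herase]
    rw [ih (fun e => g (if (j : Int) < e then e + 1 else e)) (PySem.Int.mod x (Nat.factorial n : Int))
      (le_trans (by omega) (PySem.Int.mod_nonneg x hFpos)) (PySem.Int.mod_lt x hFpos)]
    -- fold the double mods and assemble
    have hmm : PySem.Int.mod (PySem.Int.mod x (Nat.factorial n : Int)) (Nat.factorial n : Int)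
        = PySem.Int.mod x (Nat.factorial n : Int) := by
      rw [PySem.Int.mod_eq_emod_of_pos hFpos, PySem.Int.mod_eq_emod_of_pos hFpos]
      exact Int.emod_emod_of_dvd x dvd_rfl
    have hmm2 : PySem.Int.mod (PySem.Int.mod x (Nat.factorial (n + 1) : Int)) (Nat.factorial n : Int)
        = PySem.Int.mod x (Nat.factorial n : Int) := by
      rw [PySem.Int.mod_eq_emod_of_pos hFpos, PySem.Int.mod_eq_emod_of_pos hMpos,
        PySem.Int.mod_eq_emod_of_pos hFpos]
      exact Int.emod_emod_of_dvd x (by rw [← hM]; exact dvd_mul_right _ _)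
    simp only [Rspec, hmm, hmm2, ← hj, List.map_cons, List.map_map, List.nil_append,
      List.singleton_append]
    simp only [show (1 : Int) + (j : Int) = (j : Int) + 1 from by ring]
    rfl

lemma coreB : ∀ (n : Nat) (x : Int),
    (PySem.List.pyRange 1 ((n : Int) + 1) 1).foldl (stepB x) []
      = Rspec n (PySem.Int.mod x (Nat.factorial n : Int)) := by
  intro n
  induction n with
  | zero =>
    intro x
    rw [PySem.List.pyRange_one_eq_nil (by norm_num)]
    simp [Rspec]
  | succ n ih =>
    intro x
    have hcast : ((n + 1 : Nat) : Int) = (n : Int) + 1 := by push_cast; ring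
    rw [hcast]
    rw [PySem.List.pyRange_one_succ_right (by omega : (1 : Int) ≤ (n : Int) + 1)]
    rw [List.foldl_append, List.foldl_cons, List.foldl_nil]
    rw [ih x]
    have hFpos := fact_pos n
    have hMpos := fact_pos (n + 1)
    have hM : (Nat.factorial n : Int) * ((n : Int) + 1) = (Nat.factorial (n + 1) : Int) := by
      rw [Nat.factorial_succ]; push_cast; ring
    have hf : pyFactorial ((n : Int) + 1 - 1) = (Nat.factorial n : Int) := by
      simp [pyFactorial]
    have hmm : PySem.Int.mod (PySem.Int.mod x (Nat.factorial (n + 1) : Int)) (Nat.factorial n : Int)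
        = PySem.Int.mod x (Nat.factorial n : Int) := by
      rw [PySem.Int.mod_eq_emod_of_pos hFpos, PySem.Int.mod_eq_emod_of_pos hMpos,
        PySem.Int.mod_eq_emod_of_pos hFpos]
      exact Int.emod_emod_of_dvd x (by rw [← hM]; exact dvd_mul_right _ _)
    simp only [stepB, Rspec, hf, hM, hmm]

-- ===== VERDICT (by name: the statement is the Claim_ definition above) =====
theorem retro_Cantor_spec : Claim_equal_retro_Cantor := by
  intro x length _ hPre
  unfold Spec_retro_Cantor retro_Cantor retro_Cantor_alt
  by_cases hl : length ≤ 0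
  · rw [PySem.List.pyRange_neg_one_eq_nil (by omega), PySem.List.pyRange_one_eq_nil (by omega)]
    simp [List.foldl]
  · have hl' : 0 < length := by omega
    rcases hPre with h | ⟨h1, h2⟩
    · omega
    obtain ⟨n, hn⟩ : ∃ n : Nat, (n : Int) = length := ⟨length.toNat, Int.toNat_of_nonneg (by omega)⟩
    have hnn : length.toNat = n := by omega
    rw [hnn] at h1 h2
    rw [← hn]
    have hA := coreA n id x h1 h2
    simp only [List.map_id] at hA
    rw [hA, coreB n x]
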